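-- pv_equiv track=rewrite | github.com/WindzJC/leadautomation | export_contacts.py | export_fetch_penalty
-- ===== SOURCE A (Python) =====
-- from typing import Dict, Iterable, List, Sequence, Tuple
--
-- FETCH_FAILURE_SNIPPETS = ("robots_disallow", "fetch_failed", "page_fetch_failed")
--
-- def export_fetch_penalty(row: Dict[str, str]) -> int:
--     fetch_status = " ".join(
--         [
--             (row.get("FetchStatus", "") or "").strip().lower(),
--             (row.get("ListingFailReason", "") or "").strip().lower(),
--             (row.get("RecencyFailReason", "") or "").strip().lower(),
--         ]
--     )
--     if any(snippet in fetch_status for snippet in FETCH_FAILURE_SNIPPETS):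
--         return -50
--     return 0
-- ===== SOURCE B (Python) =====
-- FETCH_FAILURE_SNIPPETS = ("robots_disallow", "fetch_failed", "page_fetch_failed")
--
-- def export_fetch_penalty(row):
--     for key in ("FetchStatus", "ListingFailReason", "RecencyFailReason"):
--         field = (row.get(key, "") or "").strip().lower()
--         if any(snippet in field for snippet in FETCH_FAILURE_SNIPPETS):
--             return -50
--     return 0
-- ===== Notes on version B (the rewrite author's own statement) =====
-- stated objective: simpler
-- what changed: Drops the joined-string construction: B normalises each of the three status fields separately and returns -50 as soon as any snippet occurs in one field (valid because the snippets contain no space, the join separator), instead of building one space-joined string and searching it.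
import Mathlib
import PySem

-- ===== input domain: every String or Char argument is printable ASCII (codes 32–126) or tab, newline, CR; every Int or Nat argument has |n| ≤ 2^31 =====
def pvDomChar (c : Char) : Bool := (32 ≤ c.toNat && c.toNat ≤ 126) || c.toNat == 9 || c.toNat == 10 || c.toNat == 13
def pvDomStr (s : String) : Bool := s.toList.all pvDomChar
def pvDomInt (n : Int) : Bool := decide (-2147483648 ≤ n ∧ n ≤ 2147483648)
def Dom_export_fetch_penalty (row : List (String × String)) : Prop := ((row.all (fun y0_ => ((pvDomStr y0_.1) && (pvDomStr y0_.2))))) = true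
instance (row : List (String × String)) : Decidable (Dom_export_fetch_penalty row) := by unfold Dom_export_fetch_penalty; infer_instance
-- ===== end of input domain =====

-- B drops A's space-joined string: it tests the three normalised fields one by one (sound since no snippet contains the space separator); objective: simpler.

-- ===== PORT A =====
def export_fetch_penalty (row : List (String × String)) : Int :=
  let fetch_status := PySem.Str.join " "
    [ PySem.Str.lower (PySem.Str.strip ((PySem.Dict.mk row).getD "FetchStatus" "")),
      PySem.Str.lower (PySem.Str.strip ((PySem.Dict.mk row).getD "ListingFailReason" "")),
      PySem.Str.lower (PySem.Str.strip ((PySem.Dict.mk row).getD "RecencyFailReason" "")) ]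
  if ["robots_disallow", "fetch_failed", "page_fetch_failed"].any
      (fun snippet => PySem.Str.isIn snippet fetch_status) then -50 else 0

-- ===== PORT B =====
-- normalised value of one field: (row.get(key, "") or "").strip().lower()
def pvNormField (row : List (String × String)) (key : String) : String :=
  PySem.Str.lower (PySem.Str.strip ((PySem.Dict.mk row).getD key ""))

def pvFieldHit (field : String) : Bool :=
  ["robots_disallow", "fetch_failed", "page_fetch_failed"].any
    (fun snippet => PySem.Str.isIn snippet field)

def export_fetch_penalty_alt (row : List (String × String)) : Int :=
  if ["FetchStatus", "ListingFailReason", "RecencyFailReason"].any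
      (fun key => pvFieldHit (pvNormField row key)) then -50 else 0

-- ===== PRECONDITION & SPEC =====
def Spec_export_fetch_penalty (row : List (String × String)) (out : Int) : Prop := out = export_fetch_penalty_alt row
instance (row : List (String × String)) (out : Int) : Decidable (Spec_export_fetch_penalty row out) := by unfold Spec_export_fetch_penalty; infer_instance

-- ===== CLAIM (what is proved, stated in full; the proofs are below) =====
def Claim_equal_export_fetch_penalty : Prop := ∀ (row : List (String × String)), Dom_export_fetch_penalty row → Spec_export_fetch_penalty row (export_fetch_penalty row)

-- ===== LEMMAS AND PROOFS =====

-- a pattern not containing x is a prefix of a ++ x :: b iff it is a prefix of a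
theorem pv_prefix_append_cons {α : Type} {s : List α} (a : List α) {x : α} {b : List α}
    (h : x ∉ s) : s <+: a ++ x :: b ↔ s <+: a := by
  induction a generalizing s with
  | nil =>
    cases s with
    | nil => simp
    | cons h' t =>
      simp only [List.nil_append]
      constructor
      · intro hp
        obtain ⟨rfl, _⟩ := List.cons_prefix_cons.mp hp
        exact absurd (List.mem_cons_self) h
      · intro hp; exact absurd hp (by simp)
  | cons y a' ih =>
    cases s with
    | nil => simp
    | cons h' t =>
      simp only [List.cons_append, List.cons_prefix_cons]
      constructor
      · rintro ⟨rfl, hp⟩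
        exact ⟨rfl, (ih (fun hm => h (List.mem_cons_of_mem _ hm))).mp hp⟩
      · rintro ⟨rfl, hp⟩
        exact ⟨rfl, hp.trans (a'.prefix_append _)⟩

-- a pattern not containing x is an infix of a ++ x :: b iff it is an infix of a or of b
theorem pv_infix_append_cons {α : Type} {s : List α} (a : List α) {x : α} {b : List α}
    (h : x ∉ s) : s <:+: a ++ x :: b ↔ s <:+: a ∨ s <:+: b := by
  induction a with
  | nil =>
    simp only [List.nil_append, List.infix_cons_iff]
    constructor
    · rintro (hp | hi)
      · cases s with
        | nil => exact Or.inl (List.nil_infix)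
        | cons h' t =>
          obtain ⟨rfl, _⟩ := List.cons_prefix_cons.mp hp
          exact absurd List.mem_cons_self h
      · exact Or.inr hi
    · rintro (hi | hi)
      · obtain ⟨t₁, t₂, he⟩ := hi
        have : s = [] := by
          have := List.append_eq_nil_iff.mp (List.append_eq_nil_iff.mp he).1
          exact this.2
        subst this; exact Or.inr (List.nil_infix)
      · exact Or.inr hi
  | cons y a' ih =>
    simp only [List.cons_append, List.infix_cons_iff, ih]
    have hp : s <+: y :: (a' ++ x :: b) ↔ s <+: y :: a' :=
      pv_prefix_append_cons (y :: a') h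
    rw [hp]
    tauto

-- membership split for one snippet: s in (f1 + " " + f2 + " " + f3) iff s in one of the fields
theorem pv_isIn_join (s f1 f2 f3 : String) (h : (' ' : Char) ∉ s.toList) :
    PySem.Str.isIn s (PySem.Str.join " " [f1, f2, f3]) =
      (PySem.Str.isIn s f1 || PySem.Str.isIn s f2 || PySem.Str.isIn s f3) := by
  rw [Bool.eq_iff_iff]
  simp only [Bool.or_eq_true, PySem.Str.isIn_iff_infix]
  have hj : (PySem.Str.join " " [f1, f2, f3]).toList
      = f1.toList ++ ' ' :: (f2.toList ++ ' ' :: f3.toList) := by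
    simp [PySem.Str.join, PySem.Chars.join, List.intercalate, List.intersperse]
  rw [hj, pv_infix_append_cons _ h, pv_infix_append_cons _ h]
  tauto

-- ===== VERDICT (by name: the statement is the Claim_ definition above) =====
-- or-transpose of a 3x3 boolean matrix: rows = snippets over the joined fields, columns = fields
theorem pv_or_transpose (a b c d e f g h i : Bool) :
    (((a || b) || c) || (((d || e) || f) || ((g || h) || i)))
      = ((a || (d || g)) || ((b || (e || h)) || (c || (f || i)))) := by
  revert a b c d e f g h i; decide

theorem export_fetch_penalty_spec : Claim_equal_export_fetch_penalty := by
  intro row _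
  unfold Spec_export_fetch_penalty
  simp only [export_fetch_penalty, export_fetch_penalty_alt, pvFieldHit, pvNormField,
    List.any_cons, List.any_nil, Bool.or_false]
  rw [pv_isIn_join _ _ _ _ (by decide), pv_isIn_join _ _ _ _ (by decide),
      pv_isIn_join _ _ _ _ (by decide), pv_or_transpose]
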